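-- pv_equiv track=rewrite | github.com/jianghaowenjhw/game_theory_duel | agent.py | _predict_next_action
-- ===== SOURCE A (Python) =====
-- from typing import List, Union, Optional
--
-- def _predict_next_action(history: List[str], pattern: str) -> str:
--     """根据找到的模式预测对手下一步动作"""
--     full_history = ''.join(['1' if a == "beat" else '0' for a in history])
--
--     # 查找所有模式出现的位置
--     positions = []
--     for i in range(len(full_history) - len(pattern)):
--         if full_history[i:i+len(pattern)] == pattern:
--             positions.append(i)
--
--     # 统计模式后的动作
--     next_actions = []
--     for pos in positions:
--         if pos + len(pattern) < len(full_history):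
--             next_actions.append(full_history[pos + len(pattern)])
--
--     # 如果有足够数据，预测最可能的下一步
--     if next_actions:
--         # 计算背叛概率
--         defect_prob = next_actions.count('1') / len(next_actions)
--         # 如果背叛概率大于50%，预测对方会背叛
--         if defect_prob > 0.5:
--             return "beat"
--
--     return "still"
-- ===== SOURCE B (Python) =====
-- def _predict_next_action(history, pattern):
--     """Shift-And (bitap) bit-parallel automaton: one streaming pass over the
--     binarized history; bit k of D is set iff pattern[:k+1] ends at the current
--     character, so there is no slicing and no positions/next_actions lists."""
--     bits = ''.join('1' if a == "beat" else '0' for a in history)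
--     m = len(pattern)
--     mask0 = mask1 = 0
--     for k, ch in enumerate(pattern):
--         if ch == '0':
--             mask0 |= 1 << k
--         elif ch == '1':
--             mask1 |= 1 << k
--     hit = 1 << (m - 1) if m else 0
--     D = 0
--     just = m == 0  # True iff a full match ended at the previous character
--     matches = ones = 0
--     for c in bits:
--         if just:
--             matches += 1
--             if c == '1':
--                 ones += 1
--         if m:
--             D = ((D << 1) | 1) & (mask1 if c == '1' else mask0)
--             just = D & hit != 0
--     return "beat" if 2 * ones > matches else "still"
-- ===== Notes on version B (the rewrite author's own statement) =====
-- stated objective: alternative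
-- what changed: Replaces A's per-position slice comparison (building positions and next_actions lists, then a float majority test) with a Shift-And (bitap) bit-parallel automaton: two pattern bitmasks are precomputed, a single streaming pass updates a state bitmask D per character, and two integer counters tally matches and following '1's, deciding with 2*ones > matches.
import Mathlib
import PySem

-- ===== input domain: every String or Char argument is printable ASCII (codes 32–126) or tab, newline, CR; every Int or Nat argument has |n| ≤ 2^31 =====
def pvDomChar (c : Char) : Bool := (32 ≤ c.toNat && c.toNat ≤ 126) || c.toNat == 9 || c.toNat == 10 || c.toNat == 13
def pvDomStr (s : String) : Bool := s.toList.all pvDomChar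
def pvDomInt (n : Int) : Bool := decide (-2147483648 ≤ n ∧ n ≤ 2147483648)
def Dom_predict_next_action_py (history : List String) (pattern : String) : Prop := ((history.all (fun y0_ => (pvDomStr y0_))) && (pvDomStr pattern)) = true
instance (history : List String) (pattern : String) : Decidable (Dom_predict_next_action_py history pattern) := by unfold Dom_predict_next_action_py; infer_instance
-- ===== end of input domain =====

-- B replaces A's per-position slice comparison (with positions/next_actions lists) by a
-- Shift-And (bitap) bit-parallel automaton: one streaming pass, two pattern bitmasks.

-- ===== PORT A =====
-- ''.join(['1' if a == "beat" else '0' for a in history])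
def pvJoinBits (history : List String) : List Char :=
  PySem.Chars.join [] (history.map (fun a => if a == "beat" then ['1'] else ['0']))

def predict_next_action_py (history : List String) (pattern : String) : String :=
  let fh : List Char := pvJoinBits history
  let p : List Char := pattern.toList
  -- for i in range(len(full_history) - len(pattern)): if full_history[i:i+len(pattern)] == pattern: positions.append(i)
  let positions : List Int :=
    (PySem.List.pyRange 0 ((fh.length : Int) - (p.length : Int))).foldl
      (fun acc i =>
        if PySem.List.slice fh (some i) (some (i + (p.length : Int))) == p then acc ++ [i] else acc) []
  -- for pos in positions: if pos + len(pattern) < len(full_history): next_actions.append(full_history[pos+len(pattern)])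
  let next_actions : List Char :=
    positions.foldl
      (fun acc pos =>
        if pos + (p.length : Int) < (fh.length : Int) then
          acc ++ [PySem.List.pyGetD fh (pos + (p.length : Int)) ' '] else acc) []
  -- 'next_actions.count('1') / len(next_actions) > 0.5' ported exactly as the integer
  -- inequality 2*count > len (the float quotient of such counts crosses 0.5 exactly there)
  if next_actions ≠ [] then
    if 2 * (PySem.List.count next_actions '1' : Int) > (next_actions.length : Int) then "beat"
    else "still"
  else "still"

-- ===== PORT B =====
-- for k, ch in enumerate(pattern): masks |= 1 << k   (structural loop, index k carried along)
def pvMasksB : List Char → Nat → Nat × Nat → Nat × Nat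
  | [], _, ms => ms
  | ch :: rest, k, ms =>
      pvMasksB rest (k + 1)
        (if ch == '0' then (ms.1 ||| (1 <<< k), ms.2)
         else if ch == '1' then (ms.1, ms.2 ||| (1 <<< k))
         else ms)

-- state (matches, ones, D, just); loop body in Python order: count first, then automaton step
def pvStepB (m : Nat) (ms : Nat × Nat) (hit : Nat) (s : Int × Int × Nat × Bool) (c : Char) :
    Int × Int × Nat × Bool :=
  let s1 := if s.2.2.2 then
      (s.1 + 1, (if c == '1' then s.2.1 + 1 else s.2.1), s.2.2.1, s.2.2.2) else s
  if m ≠ 0 then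
    let D := ((s1.2.2.1 <<< 1) ||| 1) &&& (if c == '1' then ms.2 else ms.1)
    (s1.1, s1.2.1, D, (D &&& hit) != 0)
  else s1

def predict_next_action_py_alt (history : List String) (pattern : String) : String :=
  let bits : List Char := pvJoinBits history
  let p : List Char := pattern.toList
  let m := p.length
  let ms := pvMasksB p 0 (0, 0)
  let hit : Nat := if m ≠ 0 then 1 <<< (m - 1) else 0
  -- 'defect_prob > 0.5' as in port A: the integer inequality 2*ones > matches
  let r := bits.foldl (pvStepB m ms hit) (0, 0, 0, decide (m = 0))
  if 2 * r.2.1 > r.1 then "beat" else "still"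

-- ===== PRECONDITION & SPEC =====
def Spec_predict_next_action_py (history : List String) (pattern : String) (out : String) : Prop := out = predict_next_action_py_alt history pattern
instance (history : List String) (pattern : String) (out : String) : Decidable (Spec_predict_next_action_py history pattern out) := by unfold Spec_predict_next_action_py; infer_instance

-- ===== CLAIM (what is proved, stated in full; the proofs are below) =====
def Claim_equal_predict_next_action_py : Prop := ∀ (history : List String) (pattern : String), Dom_predict_next_action_py history pattern → Spec_predict_next_action_py history pattern (predict_next_action_py history pattern)

-- ===== LEMMAS AND PROOFS =====
theorem pv_take_beq (s p : List Char) : (List.take p.length s == p) = List.isPrefixOf p s := by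
  rw [Bool.eq_iff_iff]
  simp only [beq_iff_eq, List.isPrefixOf_iff_prefix, List.prefix_iff_eq_take]
  exact eq_comm

theorem pvJoinBits_eq (history : List String) :
    pvJoinBits history = history.map (fun a => if a == "beat" then '1' else '0') := by
  have h : history.map (fun a => if a == "beat" then ['1'] else ['0'])
      = (history.map (fun a => if a == "beat" then '1' else '0')).map ([·]) := by
    rw [List.map_map]; apply List.map_congr_left; intro a _; by_cases h : a = "beat" <;> simp [h]
  rw [pvJoinBits, h, PySem.Chars.join_nil_singletons]

theorem pvJoinBits_chars (history : List String) (c : Char) (hc : c ∈ pvJoinBits history) :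
    c = '0' ∨ c = '1' := by
  rw [pvJoinBits_eq] at hc
  obtain ⟨a, _, ha⟩ := List.mem_map.mp hc
  by_cases h : a = "beat" <;> simp [h] at ha <;> [right; left] <;> exact ha.symm

def pvOccB (bits p : List Char) : Nat → Bool := fun i => p.isPrefixOf (bits.drop i)

def pvInv (bits p : List Char) (j : Nat) (s : Int × Int × Nat × Bool) : Prop :=
  s.1 = ((List.range (j - p.length)).countP (pvOccB bits p) : Int)
  ∧ s.2.1 = ((List.range (j - p.length)).countP
      (fun i => pvOccB bits p i && (bits.getD (i + p.length) ' ' == '1')) : Int)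
  ∧ (∀ t, s.2.2.1.testBit t
      = (decide (t < p.length) && decide (t + 1 ≤ j)
          && decide (∀ u, u ≤ t → bits.getD (j - 1 - t + u) ' ' = p.getD u ' ')))
  ∧ s.2.2.2 = decide (p.length ≤ j ∧ ∀ u, u < p.length → bits.getD (j - p.length + u) ' ' = p.getD u ' ')

theorem pv_fold_inv {σ : Type} (bits : List Char) (f : σ → Char → σ) (I : Nat → σ → Prop)
    (step : ∀ j (h : j < bits.length) s, I j s → I (j + 1) (f s (bits.getD j ' '))) :
    ∀ (j : Nat) (s : σ), j ≤ bits.length → I j s → I bits.length ((bits.drop j).foldl f s) := by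
  intro j
  induction hd : bits.length - j generalizing j with
  | zero =>
    intro s hj hI
    have : j = bits.length := by omega
    subst this; simpa using hI
  | succ d ih =>
    intro s hj hI
    have hjl : j < bits.length := by omega
    rw [List.drop_eq_getElem_cons hjl, List.foldl_cons]
    have hg : bits[j] = bits.getD j ' ' := by rw [List.getD_eq_getElem _ _ hjl]
    rw [hg]
    exact ih (j + 1) (by omega) _ (by omega) (step j hjl s hI)

theorem pv_inv_zero (bits p : List Char) :
    pvInv bits p 0 (0, 0, 0, decide (p.length = 0)) := by
  refine ⟨by simp, by simp, fun t => by simp, ?_⟩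
  simp only [Nat.zero_sub, Nat.le_zero, decide_eq_decide]
  constructor
  · intro h; exact ⟨h, fun u hu => absurd hu (by omega)⟩
  · exact fun h => h.1

theorem pv_one_shift_testBit (k t : Nat) : ((1 : Nat) <<< k).testBit t = decide (t = k) := by
  rw [Nat.shiftLeft_eq, one_mul, Nat.testBit_two_pow]
  simp [eq_comm]

theorem pv_testBit_one (t : Nat) : (1 : Nat).testBit t = decide (t = 0) := by
  rw [show (1 : Nat) = 1 <<< 0 from rfl, pv_one_shift_testBit]

theorem pv_mask_core (C ch : Char) (rest : List Char) (k t : Nat) (b : Bool) :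
    ((b || (decide (t = k) && (ch == C)))
      || (decide (k + 1 ≤ t) && decide (t - (k + 1) < rest.length) && (rest.getD (t - (k + 1)) ' ' == C)))
    = (b || (decide (k ≤ t) && decide (t - k < (ch :: rest).length) && ((ch :: rest).getD (t - k) ' ' == C))) := by
  by_cases htk : t = k
  · subst htk
    rw [decide_eq_false (by omega : ¬ (t + 1 ≤ t)), decide_eq_true (le_refl t),
      decide_eq_true (show t - t < (ch :: rest).length by simp)]
    simp [Nat.sub_self, List.getD_cons_zero]
  · by_cases hle : k + 1 ≤ t
    · have h' : t - k = (t - (k + 1)) + 1 := by omega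
      rw [decide_eq_false htk, h', List.getD_cons_succ, decide_eq_true hle,
        decide_eq_true (by omega : k ≤ t), List.length_cons,
        show (decide (t - (k+1) < rest.length)) = (decide (t - (k+1) + 1 < rest.length + 1)) by
          simp]
      simp
    · rw [decide_eq_false htk, decide_eq_false hle, decide_eq_false (by omega : ¬ k ≤ t)]
      simp

theorem pvMasksB_testBit (p : List Char) : ∀ (k : Nat) (ms : Nat × Nat) (t : Nat),
    ((pvMasksB p k ms).1.testBit t
        = (ms.1.testBit t || (decide (k ≤ t) && decide (t - k < p.length) && (p.getD (t - k) ' ' == '0'))))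
    ∧ ((pvMasksB p k ms).2.testBit t
        = (ms.2.testBit t || (decide (k ≤ t) && decide (t - k < p.length) && (p.getD (t - k) ' ' == '1')))) := by
  induction p with
  | nil => intro k ms t; simp [pvMasksB]
  | cons ch rest ih =>
    intro k ms t
    obtain ⟨ih1, ih2⟩ := ih (k + 1)
      (if ch == '0' then (ms.1 ||| (1 <<< k), ms.2)
       else if ch == '1' then (ms.1, ms.2 ||| (1 <<< k))
       else ms) t
    rw [pvMasksB] at *
    have acc1 : (if ch == '0' then (ms.1 ||| (1 <<< k), ms.2)
       else if ch == '1' then (ms.1, ms.2 ||| (1 <<< k)) else ms).1.testBit t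
        = (ms.1.testBit t || (decide (t = k) && (ch == '0'))) := by
      by_cases h0 : ch = '0'
      · subst h0
        simp only [beq_self_eq_true, if_true]
        rw [Nat.testBit_or, pv_one_shift_testBit]
        simp
      · have e0 : (ch == '0') = false := by simp [h0]
        rw [e0, if_neg (by simp)]
        by_cases h1 : ch = '1' <;> simp [h1]
    have acc2 : (if ch == '0' then (ms.1 ||| (1 <<< k), ms.2)
       else if ch == '1' then (ms.1, ms.2 ||| (1 <<< k)) else ms).2.testBit t
        = (ms.2.testBit t || (decide (t = k) && (ch == '1'))) := by
      by_cases h0 : ch = '0'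
      · simp [h0, Nat.testBit_or, pv_one_shift_testBit]
      · have e0 : (ch == '0') = false := by simp [h0]
        rw [e0, if_neg (by simp)]
        by_cases h1 : ch = '1'
        · subst h1
          simp only [beq_self_eq_true, if_true]
          rw [Nat.testBit_or, pv_one_shift_testBit]
          simp
        · simp [h1]
    exact ⟨by rw [ih1, acc1, pv_mask_core], by rw [ih2, acc2, pv_mask_core]⟩

theorem pv_occ_pointwise (bits p : List Char) (i : Nat) (h : i + p.length ≤ bits.length) :
    p.isPrefixOf (bits.drop i) = decide (∀ u, u < p.length → bits.getD (i + u) ' ' = p.getD u ' ') := by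
  rw [Bool.eq_iff_iff, List.isPrefixOf_iff_prefix, decide_eq_true_iff]
  rw [List.prefix_iff_eq_take]
  constructor
  · intro hp u hu
    have h1 : p[u]? = bits[i + u]? := by
      conv_lhs => rw [hp]
      rw [List.getElem?_take_of_lt hu, List.getElem?_drop]
    rw [List.getD_eq_getElem?_getD, List.getD_eq_getElem?_getD, h1]
  · intro hpt
    apply List.ext_getElem
    · rw [List.length_take, List.length_drop]; omega
    · intro u h1 h2
      rw [List.getElem_take, List.getElem_drop]
      have := hpt u h1
      rw [List.getD_eq_getElem _ _ (by omega), List.getD_eq_getElem _ _ h1] at this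
      exact this.symm

theorem pv_count_step (q : Nat → Bool) (x : Nat) :
    (List.range (x + 1)).countP q = (List.range x).countP q + (if q x then 1 else 0) := by
  rw [List.range_succ, List.countP_append]
  simp [List.countP_cons]

theorem pv_step_inv (bits p : List Char) (hbits : ∀ c ∈ bits, c = '0' ∨ c = '1')
    (j : Nat) (hj : j < bits.length) (s : Int × Int × Nat × Bool) (hI : pvInv bits p j s) :
    pvInv bits p (j + 1)
      (pvStepB p.length (pvMasksB p 0 (0, 0))
        (if p.length ≠ 0 then 1 <<< (p.length - 1) else 0) s (bits.getD j ' ')) := by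
  obtain ⟨ma, on, D, ju⟩ := s
  obtain ⟨h1, h2, h3, h4⟩ := hI
  simp only at h1 h2 h3 h4
  have hc : bits.getD j ' ' = '0' ∨ bits.getD j ' ' = '1' := by
    rw [List.getD_eq_getElem _ _ hj]
    exact hbits _ (List.getElem_mem hj)
  -- the two masks, at k = 0 from (0,0)
  have hm0 : ∀ t, (pvMasksB p 0 (0, 0)).1.testBit t
      = (decide (t < p.length) && (p.getD t ' ' == '0')) := by
    intro t
    rw [(pvMasksB_testBit p 0 (0, 0) t).1]
    simp
  have hm1 : ∀ t, (pvMasksB p 0 (0, 0)).2.testBit t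
      = (decide (t < p.length) && (p.getD t ' ' == '1')) := by
    intro t
    rw [(pvMasksB_testBit p 0 (0, 0) t).2]
    simp
  by_cases hm : p.length = 0
  · -- m = 0: the automaton branch is skipped; just stays true and every char is counted
    have hp : p = [] := List.length_eq_zero_iff.mp hm
    subst hp
    have hju : ju = true := by rw [h4]; simp
    subst hju
    rw [show pvStepB [].length (pvMasksB ([] : List Char) 0 (0, 0))
          (if ([] : List Char).length ≠ 0 then 1 <<< (([] : List Char).length - 1) else 0)
          (ma, on, D, true) (bits.getD j ' ')
        = (ma + 1, (if bits.getD j ' ' == '1' then on + 1 else on), D, true) from by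
      simp [pvStepB]]
    simp only [List.length_nil, Nat.sub_zero, Nat.add_zero] at h1 h2
    refine ⟨?_, ?_, ?_, ?_⟩
    · simp only [List.length_nil, Nat.sub_zero]
      rw [pv_count_step, if_pos (by simp [pvOccB])]
      push_cast
      omega
    · simp only [List.length_nil, Nat.sub_zero, Nat.add_zero]
      rw [pv_count_step,
        show (pvOccB bits [] j && (bits.getD j ' ' == '1')) = (bits.getD j ' ' == '1') from by
          simp [pvOccB]]
      cases hb : (bits.getD j ' ' == '1') <;> simp only [if_true, if_false, Bool.false_eq_true] <;>
        push_cast <;> omega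
    · intro t
      rw [h3 t]
      simp
    · simp
  · -- m ≠ 0: the automaton advances; just mirrors bit m-1 of D
    rw [show pvStepB p.length (pvMasksB p 0 (0, 0))
          (if p.length ≠ 0 then 1 <<< (p.length - 1) else 0) (ma, on, D, ju) (bits.getD j ' ')
        = ((if ju then ma + 1 else ma),
           (if ju then (if bits.getD j ' ' == '1' then on + 1 else on) else on),
           ((D <<< 1 ||| 1) &&& (if bits.getD j ' ' == '1' then (pvMasksB p 0 (0, 0)).2 else (pvMasksB p 0 (0, 0)).1)),
           ((((D <<< 1 ||| 1) &&& (if bits.getD j ' ' == '1' then (pvMasksB p 0 (0, 0)).2 else (pvMasksB p 0 (0, 0)).1))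
              &&& (1 <<< (p.length - 1))) != 0)) from by
      cases ju <;> simp [pvStepB, hm]]
    have hmask : ∀ t, (if bits.getD j ' ' == '1' then (pvMasksB p 0 (0, 0)).2 else (pvMasksB p 0 (0, 0)).1).testBit t
        = (decide (t < p.length) && (p.getD t ' ' == bits.getD j ' ')) := by
      intro t
      rcases hc with hc | hc <;> rw [hc]
      · rw [if_neg (by decide), hm0 t]
      · rw [if_pos (by decide), hm1 t]
    have hDbit : ∀ t, ((D <<< 1 ||| 1) &&& (if bits.getD j ' ' == '1' then (pvMasksB p 0 (0, 0)).2 else (pvMasksB p 0 (0, 0)).1)).testBit t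
        = (decide (t < p.length) && decide (t + 1 ≤ j + 1)
            && decide (∀ u, u ≤ t → bits.getD (j - t + u) ' ' = p.getD u ' ')) := by
      intro t
      rw [Nat.testBit_and, Nat.testBit_or, Nat.testBit_shiftLeft, pv_testBit_one, hmask t]
      by_cases ht : t = 0
      · subst ht
        simp only [Nat.sub_zero, decide_eq_false (by omega : ¬ (1 ≤ 0)), Bool.false_and, Bool.false_or]
        rw [Bool.eq_iff_iff]
        simp only [Bool.and_eq_true, decide_eq_true_iff, beq_iff_eq]
        constructor
        · rintro ⟨_, h5, h6⟩
          exact ⟨⟨h5, by omega⟩, fun u hu => by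
            have : u = 0 := by omega
            subst this
            rw [Nat.add_zero]
            exact h6.symm⟩
        · rintro ⟨⟨h5, _⟩, h7⟩
          exact ⟨trivial, h5, by
            have := h7 0 (le_refl 0)
            rw [Nat.add_zero] at this
            exact this.symm⟩
      · rw [decide_eq_false ht, decide_eq_true (by omega : 1 ≤ t), h3 (t - 1),
          show t - 1 + 1 = t from by omega]
        by_cases htj : t ≤ j
        · rw [show j - 1 - (t - 1) = j - t from by omega]
          simp only [Bool.or_false, Bool.true_and]
          rw [Bool.eq_iff_iff]
          simp only [Bool.and_eq_true, decide_eq_true_iff, beq_iff_eq]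
          constructor
          · rintro ⟨⟨⟨_, _⟩, hall⟩, htm, hlast⟩
            refine ⟨⟨htm, by omega⟩, fun u hu => ?_⟩
            rcases Nat.lt_or_ge u t with hu' | hu'
            · exact hall u (by omega)
            · have hut : u = t := by omega
              rw [hut, show j - t + t = j from by omega]
              exact hlast.symm
          · rintro ⟨⟨htm, _⟩, hall⟩
            refine ⟨⟨⟨by omega, by omega⟩, fun u hu => hall u (by omega)⟩, htm, ?_⟩
            have := hall t (le_refl t)
            rw [show j - t + t = j from by omega] at this
            exact this.symm
        · rw [decide_eq_false (by omega : ¬ (t ≤ j)), decide_eq_false (by omega : ¬ (t + 1 ≤ j + 1))]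
          simp
    refine ⟨?_, ?_, ?_, ?_⟩
    · by_cases hmj : p.length ≤ j
      · rw [show j + 1 - p.length = (j - p.length) + 1 from by omega, pv_count_step]
        have hoccju : pvOccB bits p (j - p.length) = ju := by
          rw [pvOccB, pv_occ_pointwise bits p (j - p.length) (by omega), h4]
          simp [hmj]
        rw [hoccju]
        cases ju <;> simp only [if_true, if_false, Bool.false_eq_true] <;> push_cast <;> omega
      · rw [show j + 1 - p.length = j - p.length from by omega]
        have hju : ju = false := by rw [h4]; simp; omega
        rw [hju, if_neg (by simp)]
        exact h1
    · by_cases hmj : p.length ≤ j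
      · rw [show j + 1 - p.length = (j - p.length) + 1 from by omega, pv_count_step]
        have hoccju : pvOccB bits p (j - p.length) = ju := by
          rw [pvOccB, pv_occ_pointwise bits p (j - p.length) (by omega), h4]
          simp [hmj]
        rw [show j - p.length + p.length = j from by omega, hoccju]
        cases ju <;> cases hb : (bits.getD j ' ' == '1') <;>
          simp only [hb, if_true, if_false, Bool.false_eq_true, Bool.false_and, Bool.true_and] <;>
          push_cast <;> omega
      · rw [show j + 1 - p.length = j - p.length from by omega]
        have hju : ju = false := by rw [h4]; simp; omega
        rw [hju, if_neg (by simp)]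
        exact h2
    · exact hDbit
    · rw [show (1 : Nat) <<< (p.length - 1) = 2 ^ (p.length - 1) from by
          rw [Nat.shiftLeft_eq, one_mul],
        Nat.and_two_pow]
      rw [show ((((D <<< 1 ||| 1) &&& (if bits.getD j ' ' == '1' then (pvMasksB p 0 (0, 0)).2 else (pvMasksB p 0 (0, 0)).1)).testBit (p.length - 1)).toNat * 2 ^ (p.length - 1) != 0)
          = ((D <<< 1 ||| 1) &&& (if bits.getD j ' ' == '1' then (pvMasksB p 0 (0, 0)).2 else (pvMasksB p 0 (0, 0)).1)).testBit (p.length - 1) from by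
        cases hb : ((D <<< 1 ||| 1) &&& (if bits.getD j ' ' == '1' then (pvMasksB p 0 (0, 0)).2 else (pvMasksB p 0 (0, 0)).1)).testBit (p.length - 1) <;>
          simp [(Nat.two_pow_pos (p.length - 1)).ne']]
      rw [hDbit (p.length - 1), decide_eq_true (by omega : p.length - 1 < p.length),
        show p.length - 1 + 1 = p.length from by omega]
      by_cases hmj1 : p.length ≤ j + 1
      · rw [show j - (p.length - 1) = j + 1 - p.length from by omega]
        simp only [Bool.true_and]
        rw [Bool.eq_iff_iff]
        simp only [Bool.and_eq_true, decide_eq_true_iff]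
        constructor
        · rintro ⟨_, hall⟩
          exact ⟨hmj1, fun u hu => hall u (by omega)⟩
        · rintro ⟨_, hall⟩
          exact ⟨hmj1, fun u hu => hall u (by omega)⟩
      · rw [decide_eq_false (by omega : ¬ (p.length ≤ j + 1))]
        simp
        omega

theorem pv_main (history : List String) (pattern : String) :
    predict_next_action_py history pattern = predict_next_action_py_alt history pattern := by
  simp only [predict_next_action_py, predict_next_action_py_alt]
  set bits := pvJoinBits history with hbits
  set p := pattern.toList with hp
  -- A side: positions is a filtered range, next_actions its image
  rw [PySem.List.foldl_append_if_eq_filter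
    (fun i => PySem.List.slice bits (some i) (some (i + (p.length : Int))) == p) _ []]
  rw [List.nil_append, PySem.List.pyRange_one 0 ((bits.length : Int) - (p.length : Int))]
  rw [show (((bits.length : Int) - (p.length : Int)) - 0).toNat = bits.length - p.length from by omega]
  have hmap : (List.range (bits.length - p.length)).map (fun k : Nat => (0 : Int) + k)
      = (List.range (bits.length - p.length)).map (fun k : Nat => (k : Int)) := by
    apply List.map_congr_left; intro k _; omega
  rw [hmap, List.filter_map]
  have hpred : ∀ k ∈ List.range (bits.length - p.length),
      ((fun i => PySem.List.slice bits (some i) (some (i + (p.length : Int))) == p) ∘ (fun k : Nat => (k : Int))) k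
        = pvOccB bits p k := by
    intro k _
    simp only [Function.comp_apply]
    rw [PySem.List.slice_natCast_add bits k p.length, pv_take_beq]
    rfl
  rw [List.filter_congr hpred]
  set F := (List.range (bits.length - p.length)).filter (pvOccB bits p) with hF
  rw [List.foldl_map]
  rw [PySem.List.foldl_congr_mem (F) _
    (fun acc (k : Nat) => acc ++ [PySem.List.pyGetD bits ((k : Int) + (p.length : Int)) ' ']) []
    (fun acc k hk => by
      have hkr : k ∈ List.range (bits.length - p.length) := (List.mem_filter.mp hk).1
      have hklt := List.mem_range.mp hkr
      rw [if_pos (by omega)])]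
  rw [PySem.List.foldl_append_singleton_eq_map, List.nil_append]
  have hg : F.map (fun k : Nat => PySem.List.pyGetD bits ((k : Int) + (p.length : Int)) ' ')
      = F.map (fun k : Nat => bits.getD (k + p.length) ' ') := by
    apply List.map_congr_left; intro k _
    rw [show ((k : Int) + (p.length : Int)) = ((k + p.length : Nat) : Int) from by push_cast; ring,
      PySem.List.pyGetD_natCast]
  rw [hg]
  -- B side: the invariant at the end of the fold
  have hchars := pvJoinBits_chars history
  have hinv : pvInv bits p bits.length
      (bits.foldl (pvStepB p.length (pvMasksB p 0 (0, 0))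
        (if p.length ≠ 0 then 1 <<< (p.length - 1) else 0)) (0, 0, 0, decide (p.length = 0))) := by
    have := pv_fold_inv bits
      (pvStepB p.length (pvMasksB p 0 (0, 0)) (if p.length ≠ 0 then 1 <<< (p.length - 1) else 0))
      (pvInv bits p)
      (fun j hj s hI => pv_step_inv bits p (fun c hc => hchars c hc) j hj s hI)
      0 (0, 0, 0, decide (p.length = 0)) (Nat.zero_le _) (pv_inv_zero bits p)
    rwa [List.drop_zero] at this
  obtain ⟨hr1, hr2, _, _⟩ := hinv
  rw [hr1, hr2]
  -- equate the two pairs of counters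
  have hlen : ((F.map (fun k : Nat => bits.getD (k + p.length) ' ')).length : Int)
      = ((List.range (bits.length - p.length)).countP (pvOccB bits p) : Int) := by
    rw [List.length_map, hF, ← List.countP_eq_length_filter]
  have hcnt : ((PySem.List.count (F.map (fun k : Nat => bits.getD (k + p.length) ' ')) '1' : Nat) : Int)
      = ((List.range (bits.length - p.length)).countP
          (fun i => pvOccB bits p i && (bits.getD (i + p.length) ' ' == '1')) : Int) := by
    rw [PySem.List.count_eq, List.count_eq_countP, List.countP_map, hF, List.countP_filter]
    congr 1
    apply List.countP_congr
    intro a _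
    simp [Bool.and_comm]
  by_cases hFe : F = []
  · have h0 : ((List.range (bits.length - p.length)).countP (pvOccB bits p)) = 0 := by
      rw [List.countP_eq_length_filter, ← hF, hFe, List.length_nil]
    have h1 : ((List.range (bits.length - p.length)).countP
        (fun i => pvOccB bits p i && (bits.getD (i + p.length) ' ' == '1'))) = 0 := by
      have hle := List.countP_mono_left (l := List.range (bits.length - p.length))
        (p := fun i => pvOccB bits p i && (bits.getD (i + p.length) ' ' == '1'))
        (q := pvOccB bits p) (fun a _ h => ((Bool.and_eq_true _ _).mp h).1)
      omega
    rw [hFe, if_neg (by simp), if_neg (by rw [h0, h1]; norm_num)]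
  · rw [if_pos (by simp [hFe]), hlen, hcnt]

theorem predict_next_action_py_spec : Claim_equal_predict_next_action_py := by
  intro history pattern _
  unfold Spec_predict_next_action_py
  exact pv_main history pattern
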